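-- pv_equiv track=rewrite | github.com/UsaYa1218/isuzu_sys | app/services/ocr_pipeline.py | _looks_like_sparse_label_table
-- ===== SOURCE A (Python) =====
-- from typing import Any
--
-- def _normalize_table_cell(value: Any) -> str:
--     if value is None:
--         return ""
--     return " ".join(str(value).replace("\u3000", " ").split())
--
-- def _looks_like_sparse_label_table(headers: list[str], rows: list[list[str]]) -> bool:
--     if len(headers) > 2 or not rows:
--         return False
--
--     normalized_headers = [_normalize_table_cell(header) for header in headers]
--     if not any(normalized_headers):
--         return False
--
--     column_non_empty = [0] * len(headers)
--     for row in rows: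
--         for index in range(min(len(headers), len(row))):
--             if _normalize_table_cell(row[index]):
--                 column_non_empty[index] += 1
--
--     return sum(1 for count in column_non_empty if count == 0) >= 1
-- ===== SOURCE B (Python) =====
-- def _normalize_table_cell(value) -> str:
--     if value is None:
--         return ""
--     return " ".join(str(value).replace("\u3000", " ").split())
--
-- def _looks_like_sparse_label_table(headers, rows):
--     if len(headers) > 2 or not rows:
--         return False
--     if not any(_normalize_table_cell(header) for header in headers):
--         return False
--     return any(
--         not any(i < len(row) and _normalize_table_cell(row[i]) for row in rows)
--         for i in range(len(headers))
--     )
-- ===== Notes on version B (the rewrite author's own statement) =====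
-- stated objective: simpler
-- what changed: Replaces A's row-major double loop that accumulates a per-column non-empty counter list with a column-major short-circuiting check: for each header column, is every row empty at that index; the column_non_empty accumulator disappears.
import Mathlib
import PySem

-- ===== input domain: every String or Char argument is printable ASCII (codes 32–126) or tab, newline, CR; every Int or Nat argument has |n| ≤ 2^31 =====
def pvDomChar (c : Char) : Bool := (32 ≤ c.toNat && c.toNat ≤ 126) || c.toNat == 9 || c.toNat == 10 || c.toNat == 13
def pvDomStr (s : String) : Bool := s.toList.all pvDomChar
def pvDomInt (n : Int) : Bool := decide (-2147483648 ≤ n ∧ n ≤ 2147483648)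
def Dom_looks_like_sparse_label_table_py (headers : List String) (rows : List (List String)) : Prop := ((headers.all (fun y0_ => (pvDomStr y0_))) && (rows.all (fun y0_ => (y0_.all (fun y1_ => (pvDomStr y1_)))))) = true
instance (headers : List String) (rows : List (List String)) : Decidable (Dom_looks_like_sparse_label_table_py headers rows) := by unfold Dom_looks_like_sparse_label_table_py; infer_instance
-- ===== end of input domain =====

-- B replaces A's row-major count accumulator with a column-major "some header column is empty in
-- every row" check (objective: simpler — the column_non_empty list disappears).

-- ===== PORT A =====
-- _normalize_table_cell on a str argument (str(value) is the identity on str, and the value is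
-- never None here): " ".join(value.replace("\u3000", " ").split()); exact via PySem.Str.
def pvNorm (value : String) : String :=
  PySem.Str.join " " (PySem.Str.split₀ (PySem.Str.replace value "\u3000" " "))

-- row[index] for 0 ≤ index < min(len(headers), len(row)) is always in range, so List.getD is
-- exact here; range(min(len(headers), len(row))) is List.range (min …); a str is truthy iff ≠ "".
def looks_like_sparse_label_table_py (headers : List String) (rows : List (List String)) : Bool :=
  if headers.length > 2 || rows.isEmpty then false
  else
    let normalized := headers.map pvNorm
    if !(normalized.any (fun h => !(h == ""))) then false
    else
      let counts := rows.foldl (fun acc row =>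
        (List.range (min headers.length row.length)).foldl
          (fun a i => if !(pvNorm (row.getD i "") == "") then a.set i (a.getD i 0 + 1) else a)
          acc) (List.replicate headers.length (0 : Int))
      decide (1 ≤ ((counts.filter (fun c => c == 0)).map (fun _ => (1 : Int))).sum)

-- ===== PORT B =====
def looks_like_sparse_label_table_py_alt (headers : List String) (rows : List (List String)) : Bool :=
  if headers.length > 2 || rows.isEmpty then false
  else if !(headers.any (fun h => !(pvNorm h == ""))) then false
  else
    (List.range headers.length).any (fun i =>
      !(rows.any (fun row => decide (i < row.length) && !(pvNorm (row.getD i "") == ""))))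

-- ===== PRECONDITION & SPEC =====
def Spec_looks_like_sparse_label_table_py (headers : List String) (rows : List (List String)) (out : Bool) : Prop := out = looks_like_sparse_label_table_py_alt headers rows
instance (headers : List String) (rows : List (List String)) (out : Bool) : Decidable (Spec_looks_like_sparse_label_table_py headers rows out) := by unfold Spec_looks_like_sparse_label_table_py; infer_instance

-- ===== CLAIM (what is proved, stated in full; the proofs are below) =====
def Claim_equal_looks_like_sparse_label_table_py : Prop := ∀ (headers : List String) (rows : List (List String)), Dom_looks_like_sparse_label_table_py headers rows → Spec_looks_like_sparse_label_table_py headers rows (looks_like_sparse_label_table_py headers rows)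

-- ===== LEMMAS AND PROOFS =====

-- A's inner loop over one row: length preserved, and slot i gains exactly 1 when i < m ∧ p i.
theorem pv_inner_len (p : Nat → Bool) (m : Nat) (acc : List Int) :
    ((List.range m).foldl (fun a j => if p j then a.set j (a.getD j 0 + 1) else a) acc).length
      = acc.length := by
  induction m with
  | zero => simp
  | succ m ih =>
      rw [List.range_succ, List.foldl_append]
      simp only [List.foldl_cons, List.foldl_nil]
      split
      · rw [List.length_set, ih]
      · exact ih

theorem pv_inner_getD (p : Nat → Bool) (m : Nat) (acc : List Int) (i : Nat)
    (hi : i < acc.length) :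
    ((List.range m).foldl (fun a j => if p j then a.set j (a.getD j 0 + 1) else a) acc).getD i 0
      = acc.getD i 0 + (if i < m ∧ p i then 1 else 0) := by
  induction m with
  | zero => simp
  | succ m ih =>
      rw [List.range_succ, List.foldl_append]
      simp only [List.foldl_cons, List.foldl_nil]
      by_cases hpm : p m
      · rw [if_pos hpm]
        by_cases him : i = m
        · rw [← him]
          have hlen : i < ((List.range i).foldl
              (fun a j => if p j then a.set j (a.getD j 0 + 1) else a) acc).length := by
            rw [pv_inner_len]; exact hi
          rw [List.getD_eq_getElem?_getD, List.getElem?_set_self hlen]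
          simp only [Option.getD_some]
          rw [him] at ih ⊢; rw [ih]
          have h1 : ¬ (m < m ∧ p m = true) := by omega
          have h2 : (m < m + 1 ∧ p m = true) := ⟨Nat.lt_succ_self m, hpm⟩
          rw [if_neg h1, if_pos h2]
          ring
        · rw [List.getD_eq_getElem?_getD, List.getElem?_set_ne (Ne.symm him),
              ← List.getD_eq_getElem?_getD, ih]
          have hlt : (i < m + 1 ∧ p i = true) ↔ (i < m ∧ p i = true) := by
            constructor
            · rintro ⟨h1, h2⟩; exact ⟨by omega, h2⟩
            · rintro ⟨h1, h2⟩; exact ⟨by omega, h2⟩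
          simp only [hlt]
      · rw [if_neg hpm, ih]
        have hlt : (i < m + 1 ∧ p i = true) ↔ (i < m ∧ p i = true) := by
          constructor
          · rintro ⟨h1, h2⟩
            refine ⟨?_, h2⟩
            rcases Nat.lt_succ_iff_lt_or_eq.mp h1 with h | h
            · exact h
            · subst h; exact absurd h2 hpm
          · rintro ⟨h1, h2⟩; exact ⟨Nat.lt_succ_of_lt h1, h2⟩
        simp only [hlt]

-- A's outer loop: slot i of the accumulator counts the rows non-empty at column i.
theorem pv_outer_len (n : Nat) (rows : List (List String)) (acc : List Int) :
    (rows.foldl (fun acc row =>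
        (List.range (min n row.length)).foldl
          (fun a i => if !(pvNorm (row.getD i "") == "") then a.set i (a.getD i 0 + 1) else a)
          acc) acc).length = acc.length := by
  induction rows generalizing acc with
  | nil => rfl
  | cons row rows ih => rw [List.foldl_cons, ih, pv_inner_len]

theorem pv_outer_getD (n : Nat) (rows : List (List String)) (acc : List Int)
    (hlen : acc.length = n) (i : Nat) (hi : i < n) :
    (rows.foldl (fun acc row =>
        (List.range (min n row.length)).foldl
          (fun a i => if !(pvNorm (row.getD i "") == "") then a.set i (a.getD i 0 + 1) else a)
          acc) acc).getD i 0
      = acc.getD i 0 +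
        (rows.countP (fun row => decide (i < row.length) && !(pvNorm (row.getD i "") == "")) : Int) := by
  induction rows generalizing acc with
  | nil => simp
  | cons row rows ih =>
      rw [List.foldl_cons]
      rw [ih _ (by rw [pv_inner_len]; exact hlen)]
      rw [pv_inner_getD _ _ _ _ (by omega)]
      rw [List.countP_cons]
      by_cases hr : i < row.length
      · have hmin : i < min n row.length := by omega
        by_cases hp : (!(pvNorm (row.getD i "") == "")) = true
        · rw [if_pos ⟨hmin, hp⟩]
          have : (decide (i < row.length) && !(pvNorm (row.getD i "") == "")) = true := by
            rw [decide_eq_true hr, hp]; rfl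
          rw [this]
          simp
          try ring
        · have hnp : ¬ (i < min n row.length ∧ (!(pvNorm (row.getD i "") == "")) = true) := by
            intro h; exact hp h.2
          rw [if_neg hnp]
          have : (decide (i < row.length) && !(pvNorm (row.getD i "") == "")) = false := by
            simp only [Bool.and_eq_false_iff]
            right; simpa using hp
          rw [this]
          simp
      · have hmin : ¬ (i < min n row.length ∧ (!(pvNorm (row.getD i "") == "")) = true) := by
          intro h; omega
        rw [if_neg hmin]
        have : (decide (i < row.length) && !(pvNorm (row.getD i "") == "")) = false := by
          simp only [Bool.and_eq_false_iff]
          left; simpa using hr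
        rw [this]
        simp

-- ===== VERDICT (by name: the statement is the Claim_ definition above) =====
theorem looks_like_sparse_label_table_py_spec : Claim_equal_looks_like_sparse_label_table_py := by
  intro headers rows _
  unfold Spec_looks_like_sparse_label_table_py
  unfold looks_like_sparse_label_table_py looks_like_sparse_label_table_py_alt
  by_cases hg : (decide (headers.length > 2) || rows.isEmpty) = true
  · rw [if_pos hg, if_pos hg]
  · rw [if_neg hg, if_neg hg]
    have hhdr : (headers.map pvNorm).any (fun h => !(h == "")) = headers.any (fun h => !(pvNorm h == "")) := by
      simp only [List.any_map, Function.comp_def]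
    simp only [hhdr]
    by_cases hh : (!(headers.any (fun h => !(pvNorm h == "")))) = true
    · rw [if_pos hh, if_pos hh]
    · rw [if_neg hh, if_neg hh]
      set n := headers.length with hn
      set counts := rows.foldl (fun acc row =>
        (List.range (min n row.length)).foldl
          (fun a i => if !(pvNorm (row.getD i "") == "") then a.set i (a.getD i 0 + 1) else a)
          acc) (List.replicate n (0 : Int)) with hcounts
      have hclen : counts.length = n := by
        rw [hcounts, pv_outer_len, List.length_replicate]
      have hcget : ∀ i, i < n → counts.getD i 0
          = (rows.countP (fun row => decide (i < row.length) && !(pvNorm (row.getD i "") == "")) : Int) := by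
        intro i hi
        rw [hcounts, pv_outer_getD n rows _ (by simp) i hi]
        rw [List.getD_eq_getElem?_getD, List.getElem?_replicate_of_lt hi]
        simp
      have hsum : ((counts.filter (fun c => c == 0)).map (fun _ => (1 : Int))).sum
          = ((counts.filter (fun c => c == 0)).length : Int) := by simp
      rw [Bool.eq_iff_iff, hsum]
      rw [decide_eq_true_eq]
      constructor
      · intro hle
        have hne : (counts.filter (fun c => c == 0)) ≠ [] := by
          intro h; rw [h] at hle; simp at hle
        obtain ⟨c, hc⟩ := List.exists_mem_of_ne_nil _ hne
        obtain ⟨hin, hzero⟩ := List.mem_filter.mp hc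
        obtain ⟨j, hj, hjc⟩ := List.getElem_of_mem hin
        have hjn : j < n := by omega
        rw [List.any_eq_true]
        refine ⟨j, List.mem_range.mpr hjn, ?_⟩
        have hjz : counts.getD j 0 = 0 := by
          rw [List.getD_eq_getElem?_getD, List.getElem?_eq_getElem hj]
          simp only [Option.getD_some, hjc]
          simpa using hzero
        rw [hcget j hjn] at hjz
        have hcnt0 : rows.countP (fun row => decide (j < row.length) && !(pvNorm (row.getD j "") == "")) = 0 := by
          exact_mod_cast hjz
        rw [Bool.not_eq_eq_eq_not, Bool.not_true, List.any_eq_false]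
        intro row hrow
        simpa using List.countP_eq_zero.mp hcnt0 row hrow
      · intro hany
        rw [List.any_eq_true] at hany
        obtain ⟨i, hmem, hcol⟩ := hany
        have hi : i < n := List.mem_range.mp hmem
        rw [Bool.not_eq_eq_eq_not, Bool.not_true, List.any_eq_false] at hcol
        have hcnt0 : rows.countP (fun row => decide (i < row.length) && !(pvNorm (row.getD i "") == "")) = 0 := by
          rw [List.countP_eq_zero]
          intro row hrow
          simpa using hcol row hrow
        have hiz : counts.getD i 0 = 0 := by rw [hcget i hi, hcnt0]; rfl
        have hmemc : (0 : Int) ∈ counts := by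
          have hceq : counts[i]'(by omega) = 0 := by
            rw [List.getD_eq_getElem?_getD, List.getElem?_eq_getElem (by omega)] at hiz
            simpa using hiz
          rw [← hceq]
          exact List.getElem_mem _
        have hmf : (0 : Int) ∈ counts.filter (fun c => c == 0) := by
          rw [List.mem_filter]; exact ⟨hmemc, by simp⟩
        have := List.length_pos_of_mem hmf
        omega
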